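-- pv_equiv track=rewrite | github.com/norman2112/portfoliosMCP | portfolios-apis/okrs-api-main/okrs_api/api/controller/helpers.py | get_product_type_for_connected_app
-- ===== SOURCE A (Python) =====
-- def get_product_type_for_connected_app(product_type):
--     """Convert Product type to connected app_name."""
--     app_map = {
--         "e1_prm": ["e1_prm", "e1", "e1_strategy"],
--         "leankit": ["leankit", "lk_board"],
--         "e1_work": ["work", "e1_work"],
--     }
--     for key in app_map:
--         if product_type in app_map[key]:
--             return key
--     return None
-- ===== SOURCE B (Python) =====
-- def get_product_type_for_connected_app(product_type):
--     """Convert Product type to connected app_name."""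
--     app_map = {
--         "e1_prm": ["e1_prm", "e1", "e1_strategy"],
--         "leankit": ["leankit", "lk_board"],
--         "e1_work": ["work", "e1_work"],
--     }
--     reverse = {}
--     for key, values in app_map.items():
--         for value in values:
--             reverse[value] = key
--     return reverse.get(product_type)
-- ===== Notes on version B (the rewrite author's own statement) =====
-- stated objective: idiomatic
-- what changed: B builds an inverted value->key index once and answers with a single dict lookup, instead of A's loop over keys with a membership test in each key's list.
import Mathlib
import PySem

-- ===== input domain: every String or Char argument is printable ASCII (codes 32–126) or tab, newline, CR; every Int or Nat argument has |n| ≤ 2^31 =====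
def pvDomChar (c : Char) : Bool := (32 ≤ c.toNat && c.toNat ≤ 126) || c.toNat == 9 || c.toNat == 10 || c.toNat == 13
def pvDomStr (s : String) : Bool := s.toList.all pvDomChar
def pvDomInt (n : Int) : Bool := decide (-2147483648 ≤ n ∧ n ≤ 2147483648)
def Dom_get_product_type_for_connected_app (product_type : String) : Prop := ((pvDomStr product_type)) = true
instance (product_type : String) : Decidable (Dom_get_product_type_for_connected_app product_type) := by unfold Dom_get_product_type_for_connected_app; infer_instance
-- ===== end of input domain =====

-- B replaces A's keys-loop-with-membership-test by building an inverted value->key index once and doing one lookup (idiomatic; same result on all strings).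


-- ===== PORT A =====
-- A: loop over the dict's keys, return first key whose value list contains product_type.
def pvAppMap : PySem.Dict String (List String) :=
  PySem.Dict.ofList [("e1_prm", ["e1_prm", "e1", "e1_strategy"]),
                     ("leankit", ["leankit", "lk_board"]),
                     ("e1_work", ["work", "e1_work"])]

def pvLoopA (product_type : String) : List String → Option String
  | [] => none
  | key :: rest =>
      if product_type ∈ (pvAppMap.get? key).getD [] then some key
      else pvLoopA product_type rest

def get_product_type_for_connected_app (product_type : String) : Option String :=
  pvLoopA product_type pvAppMap.keys

-- ===== PORT B =====
-- B: build an inverted value->key dict once, then one direct lookup.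
def pvAppPairsB : List (String × List String) :=
  [("e1_prm", ["e1_prm", "e1", "e1_strategy"]),
   ("leankit", ["leankit", "lk_board"]),
   ("e1_work", ["work", "e1_work"])]

def pvReverse : PySem.Dict String String :=
  pvAppPairsB.foldl (fun r kv => kv.2.foldl (fun r v => r.insert v kv.1) r) PySem.Dict.empty

def get_product_type_for_connected_app_alt (product_type : String) : Option String :=
  pvReverse.get? product_type

-- ===== PRECONDITION & SPEC =====
def Spec_get_product_type_for_connected_app (product_type : String) (out : Option String) : Prop := out = get_product_type_for_connected_app_alt product_type
instance (product_type : String) (out : Option String) : Decidable (Spec_get_product_type_for_connected_app product_type out) := by unfold Spec_get_product_type_for_connected_app; infer_instance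

-- ===== CLAIM (what is proved, stated in full; the proofs are below) =====
def Claim_equal_get_product_type_for_connected_app : Prop := ∀ (product_type : String), Dom_get_product_type_for_connected_app product_type → Spec_get_product_type_for_connected_app product_type (get_product_type_for_connected_app product_type)

-- ===== LEMMAS AND PROOFS =====

-- ===== VERDICT (by name: the statement is the Claim_ definition above) =====
theorem get_product_type_for_connected_app_spec : Claim_equal_get_product_type_for_connected_app := by
  intro s _
  unfold Spec_get_product_type_for_connected_app
  simp only [get_product_type_for_connected_app, get_product_type_for_connected_app_alt,
    pvReverse, pvAppPairsB, List.foldl]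
  simp only [pvAppMap, PySem.Dict.ofList, PySem.Dict.empty, PySem.Dict.update,
    PySem.Dict.insert, PySem.Dict.keys, PySem.Dict.contains]
  simp [pvLoopA]
  simp only [show (pvAppMap.get? "e1_prm").getD [] = ["e1_prm","e1","e1_strategy"] from by decide,
    show (pvAppMap.get? "leankit").getD [] = ["leankit","lk_board"] from by decide,
    show (pvAppMap.get? "e1_work").getD [] = ["work","e1_work"] from by decide,
    List.mem_cons, List.not_mem_nil, or_false]
  split_ifs with h1 h2 h3
  · rcases h1 with h|h|h <;> subst h <;> decide
  · rcases h2 with h|h <;> subst h <;> decide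
  · rcases h3 with h|h <;> subst h <;> decide
  · simp only [not_or] at h1 h2 h3
    obtain ⟨a1, a2, a3⟩ := h1; obtain ⟨b1, b2⟩ := h2; obtain ⟨c1, c2⟩ := h3
    simp [Ne.symm a1, Ne.symm a2, Ne.symm a3,
      Ne.symm b1, Ne.symm b2, Ne.symm c1, Ne.symm c2, PySem.Dict.get?]
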